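-- pv_equiv track=rewrite | github.com/i960107/algorithm | baekjoon/외계인의기타연주.py | solution
-- ===== SOURCE A (Python) =====
-- from typing import List
--
-- def solution(N: int, P: int, melody: List[List[int]]):
--     stk = [[] for _ in range(6)]
--     cnt = 0
--     for l, p in melody:
--         if not stk[l - 1] or stk[l - 1][-1] < p:
--             cnt += 1
--             stk[l - 1].append(p)
--         elif stk[l - 1][-1] > p:
--             while stk[l - 1] and stk[l - 1][-1] > p:
--                 cnt += 1
--                 stk[l - 1].pop()
--
--             if not stk[l - 1] or stk[l - 1][-1] != p:
--                 cnt += 1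
--                 stk[l - 1].append(p)
--     return cnt
-- ===== SOURCE B (Python) =====
-- from bisect import bisect_right
-- from typing import List
--
-- def solution(N: int, P: int, melody: List[List[int]]):
--     # Each per-line stack is always strictly increasing, so the frets released
--     # by a note p are exactly the suffix of frets > p: find it with one binary
--     # search and truncate in bulk, then press p unless it is already on top.
--     stk = [[] for _ in range(6)]
--     cnt = 0
--     for l, p in melody:
--         s = stk[l - 1]
--         i = bisect_right(s, p)
--         cnt += len(s) - i
--         del s[i:]
--         if not s or s[-1] != p:
--             s.append(p)
--             cnt += 1
--     return cnt
-- ===== Notes on version B (the rewrite author's own statement) =====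
-- stated objective: simpler
-- what changed: Replaces A's three-way branch with an if/elif chain and an inner one-by-one pop-while loop by a single unified body: a bisect_right binary search on the (always strictly increasing) per-line stack, bulk truncation of the released suffix, and one press check.
import Mathlib
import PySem

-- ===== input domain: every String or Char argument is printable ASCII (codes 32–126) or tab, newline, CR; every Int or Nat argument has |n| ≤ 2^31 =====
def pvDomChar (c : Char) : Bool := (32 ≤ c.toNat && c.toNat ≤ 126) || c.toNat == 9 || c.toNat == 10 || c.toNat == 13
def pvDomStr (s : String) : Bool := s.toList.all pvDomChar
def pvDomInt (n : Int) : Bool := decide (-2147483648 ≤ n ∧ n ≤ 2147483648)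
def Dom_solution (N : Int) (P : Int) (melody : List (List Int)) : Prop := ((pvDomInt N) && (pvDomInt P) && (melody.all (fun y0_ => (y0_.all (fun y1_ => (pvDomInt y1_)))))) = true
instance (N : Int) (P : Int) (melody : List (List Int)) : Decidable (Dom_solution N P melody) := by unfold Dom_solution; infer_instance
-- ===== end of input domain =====

-- B replaces A's branchy pop-while loop by bisect_right + bulk truncation on the
-- (always strictly increasing) per-line stack; same return value, simpler body.

-- Shared helper: Python indexing `stk[l - 1]` into the fixed list of 6 stacks
-- (negative indices wrap, as in Python; none = IndexError, excluded by Pre_).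
def lineIdx (l : Int) : Option Nat :=
  if 0 ≤ l - 1 ∧ l - 1 < 6 then some (l - 1).toNat
  else if -6 ≤ l - 1 ∧ l - 1 < 0 then some (l - 1 + 6).toNat
  else none

-- ===== PORT A =====
-- the inner `while stk[l-1] and stk[l-1][-1] > p: cnt += 1; stk[l-1].pop()`
def popGT (s : List Int) (p : Int) : Int × List Int :=
  match h : s.getLast? with
  | none => (0, s)
  | some t =>
    if t > p then
      let r := popGT s.dropLast p
      (r.1 + 1, r.2)
    else (0, s)
termination_by s.length
decreasing_by
  cases s with
  | nil => simp at h
  | cons a as => simp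

-- one iteration of A's `for l, p in melody` body on one stack; returns (cnt increment, new stack)
def stepA_s (s : List Int) (p : Int) : Int × List Int :=
  match s.getLast? with
  | none => (1, s ++ [p])
  | some t =>
    if t < p then (1, s ++ [p])
    else if t > p then
      let r := popGT s p
      match r.2.getLast? with
      | none => (r.1 + 1, r.2 ++ [p])
      | some t' => if t' ≠ p then (r.1 + 1, r.2 ++ [p]) else (r.1, r.2)
    else (0, s)

def stepA (st : List (List Int) × Int) (row : List Int) : List (List Int) × Int :=
  match row with
  | [l, p] =>
    match lineIdx l with
    | some j =>
      let r := stepA_s (st.1.getD j []) p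
      (st.1.set j r.2, st.2 + r.1)
    | none => st     -- Python raises IndexError; excluded by Pre_
  | _ => st          -- Python raises ValueError on unpacking; excluded by Pre_

def solution (N : Int) (P : Int) (melody : List (List Int)) : Int :=
  (melody.foldl stepA ([[], [], [], [], [], []], 0)).2

-- ===== PORT B =====
-- one iteration of B's loop body: bisect_right, bulk truncate, press check
def stepB_s (s : List Int) (p : Int) : Int × List Int :=
  let i := PySem.List.bisectRight s p
  let c : Int := (s.length : Int) - (i : Int)
  let s' := s.take i
  match s'.getLast? with
  | none => (c + 1, s' ++ [p])
  | some t => if t ≠ p then (c + 1, s' ++ [p]) else (c, s')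

def stepB (st : List (List Int) × Int) (row : List Int) : List (List Int) × Int :=
  match row with
  | [l, p] =>
    match lineIdx l with
    | some j =>
      let r := stepB_s (st.1.getD j []) p
      (st.1.set j r.2, st.2 + r.1)
    | none => st
  | _ => st

def solution_alt (N : Int) (P : Int) (melody : List (List Int)) : Int :=
  (melody.foldl stepB ([[], [], [], [], [], []], 0)).2

-- ===== PRECONDITION & SPEC =====
-- Pre_: exactly the inputs the Python A returns on — every row unpacks as a pair
-- (l, p) and stk[l-1] is a valid (possibly negative, wrapping) index into the 6
-- stacks, i.e. -5 <= l <= 6; otherwise A raises ValueError/IndexError.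
def Pre_solution (N : Int) (P : Int) (melody : List (List Int)) : Prop :=
  ∀ row ∈ melody, row.length = 2 ∧ -5 ≤ row.getD 0 0 ∧ row.getD 0 0 ≤ 6
instance (N : Int) (P : Int) (melody : List (List Int)) : Decidable (Pre_solution N P melody) := by unfold Pre_solution; infer_instance

def pvWitness_solution : Int × Int × List (List Int) := (6, 20, [[1, 5], [2, 3], [1, 2], [1, 5], [1, 1]])

def Spec_solution (N : Int) (P : Int) (melody : List (List Int)) (out : Int) : Prop := out = solution_alt N P melody
instance (N : Int) (P : Int) (melody : List (List Int)) (out : Int) : Decidable (Spec_solution N P melody out) := by unfold Spec_solution; infer_instance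

-- ===== CLAIM (what is proved, stated in full; the proofs are below) =====
def Claim_equal_solution : Prop := ∀ (N : Int) (P : Int) (melody : List (List Int)), Dom_solution N P melody → Pre_solution N P melody → Spec_solution N P melody (solution N P melody)


-- ===== LEMMAS AND PROOFS =====

-- abbreviation used only in proofs: the strict-increase invariant on all six stacks
def InvStk (stk : List (List Int)) : Prop := ∀ s ∈ stk, List.Pairwise (· < ·) s

lemma sorted_last_le {s : List Int} {t : Int} (h : List.Pairwise (· ≤ ·) s)
    (hl : s.getLast? = some t) : ∀ x ∈ s, x ≤ t := by
  obtain ⟨l', rfl⟩ := List.getLast?_eq_some_iff.mp hl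
  intro x hx
  rcases List.mem_append.mp hx with h1 | h2
  · exact (List.pairwise_append.mp h).2.2 x h1 t (by simp)
  · simp at h2; omega

lemma dropWhile_gt {p : Int} : ∀ {s : List Int}, List.Pairwise (· ≤ ·) s →
    ∀ x ∈ s.dropWhile (fun y => decide (y ≤ p)), p < x := by
  intro s
  induction s with
  | nil => simp
  | cons a s' ih =>
    intro h x hx
    obtain ⟨ha, htail⟩ := List.pairwise_cons.mp h
    rw [List.dropWhile_cons] at hx
    by_cases hq : a ≤ p
    · simp [hq] at hx; exact ih htail x hx
    · simp [hq] at hx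
      rcases hx with rfl | hx
      · omega
      · have := ha x hx; omega

lemma bisect_tw {s : List Int} (p : Int) (h : List.Pairwise (· ≤ ·) s) :
    PySem.List.bisectRight s p = (s.takeWhile (fun y => decide (y ≤ p))).length := by
  obtain ⟨h1, h2, h3⟩ := PySem.List.bisectRight_spec s p h
  set q := fun y : Int => decide (y ≤ p) with hq
  set i := PySem.List.bisectRight s p with hi
  set tw := s.takeWhile q with htw
  have htwle : tw.length ≤ s.length := (List.takeWhile_prefix q).length_le
  by_contra hne
  rcases Nat.lt_or_ge i tw.length with hlt | hge
  · have hiL : i < s.length := lt_of_lt_of_le hlt htwle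
    have hgt := h3 i hiL (le_refl i)
    have hmem : s[i] ∈ tw := by
      have hpe : tw[i]'hlt = s[i] := List.IsPrefix.getElem (List.takeWhile_prefix q) hlt
      rw [← hpe]; exact List.getElem_mem _
    have := List.mem_takeWhile_imp hmem
    simp [hq] at this; omega
  · have hlt : tw.length < i := lt_of_le_of_ne hge (fun e => hne e.symm)
    have hjL : tw.length < s.length := lt_of_lt_of_le hlt h1
    have hle := h2 tw.length hjL hlt
    have hsplit : tw ++ s.dropWhile q = s := List.takeWhile_append_dropWhile
    have hdlen : 0 < (s.dropWhile q).length := by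
      have := congrArg List.length hsplit; simp at this; omega
    have hgE : s[tw.length]? = (s.dropWhile q)[0]? := by
      conv_lhs => rw [← hsplit]
      rw [List.getElem?_append_right (le_refl tw.length)]
      simp
    rw [List.getElem?_eq_getElem hjL, List.getElem?_eq_getElem hdlen] at hgE
    have := dropWhile_gt h _ (List.getElem_mem hdlen)
    rw [Option.some_inj] at hgE
    omega

lemma popGT_none {s : List Int} {p : Int} (h : s.getLast? = none) : popGT s p = (0, s) := by
  rw [popGT.eq_def]
  split
  · rfl
  · next t h' => rw [h] at h'; cases h'

lemma popGT_some_le {s : List Int} {t p : Int} (h : s.getLast? = some t) (hle : t ≤ p) :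
    popGT s p = (0, s) := by
  rw [popGT.eq_def]
  split
  · next h' => rw [h] at h'
  · next t' h' =>
    rw [h] at h'
    injection h' with h''
    rw [if_neg (by omega)]

lemma popGT_some_gt {s : List Int} {t p : Int} (h : s.getLast? = some t) (hgt : p < t) :
    popGT s p = ((popGT s.dropLast p).1 + 1, (popGT s.dropLast p).2) := by
  rw [popGT.eq_def]
  split
  · next h' => rw [h] at h' ; simp at h'
  · next t' h' =>
    rw [h] at h'
    injection h' with h''
    rw [if_pos (by omega)]

lemma popGT_split (p : Int) : ∀ (v u : List Int), (∀ x ∈ v, p < x) →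
    (∀ t, u.getLast? = some t → t ≤ p) → popGT (u ++ v) p = ((v.length : Int), u) := by
  intro v
  induction v using List.reverseRecOn with
  | nil =>
    intro u _ hu
    rw [List.append_nil]
    cases hL : u.getLast? with
    | none =>
      have := List.getLast?_eq_none_iff.mp hL
      subst this
      simp [popGT_none (p := p) (s := ([] : List Int)) rfl]
    | some t => simp [popGT_some_le hL (hu t hL)]
  | append_singleton v' t ih =>
    intro u hv hu
    rw [← List.append_assoc]
    have hgt : p < t := hv t (by simp)
    rw [popGT_some_gt List.getLast?_concat hgt, List.dropLast_concat]
    rw [ih u (fun x hx => hv x (by simp [hx])) hu]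
    simp

lemma step_s_eq (s : List Int) (p : Int) (h : List.Pairwise (· < ·) s) :
    stepA_s s p = stepB_s s p := by
  have hle : List.Pairwise (· ≤ ·) s := h.imp (fun hab => le_of_lt hab)
  have hb := bisect_tw (s := s) p hle
  have ht2 : List.take (s.takeWhile (fun y => decide (y ≤ p))).length s
      = s.takeWhile (fun y => decide (y ≤ p)) :=
    (List.prefix_iff_eq_take.mp (List.takeWhile_prefix _)).symm
  cases hL : s.getLast? with
  | none =>
    have hs : s = [] := List.getLast?_eq_none_iff.mp hL
    subst hs
    simp [stepA_s, stepB_s, hb]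
  | some t =>
    have hall : ∀ x ∈ s, x ≤ t := sorted_last_le hle hL
    by_cases h1 : t < p
    · have htw : s.takeWhile (fun y => decide (y ≤ p)) = s :=
        List.takeWhile_eq_self_iff.mpr (fun x hx => by
          have := hall x hx; simp; omega)
      simp only [stepA_s, stepB_s, hL, if_pos h1, hb, htw, List.take_length]
      rw [if_pos (by omega : t ≠ p)]
      have he : (s.length : Int) - (s.length : Int) + 1 = 1 := by omega
      rw [he]
    · by_cases h2 : p < t
      · have hsplit : s.takeWhile (fun y => decide (y ≤ p)) ++
            s.dropWhile (fun y => decide (y ≤ p)) = s := List.takeWhile_append_dropWhile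
        set tw := s.takeWhile (fun y => decide (y ≤ p)) with htwdef
        set dw := s.dropWhile (fun y => decide (y ≤ p)) with hdwdef
        have hpop : popGT s p = ((dw.length : Int), tw) := by
          rw [← hsplit]
          exact popGT_split p dw tw (dropWhile_gt hle)
            (fun t' h' => by
              have := List.mem_takeWhile_imp (List.mem_of_getLast? h')
              simpa using this)
        have hlen : s.length = tw.length + dw.length := by
          have := congrArg List.length hsplit; simp at this; omega
        have hc : (s.length : Int) - (tw.length : Int) = (dw.length : Int) := by
          rw [hlen]; push_cast; ring
        simp only [stepA_s, stepB_s, hL, if_neg (by omega : ¬ t < p), if_pos h2, hpop, hb,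
          ht2, hc]
      · have htp : t = p := by omega
        subst htp
        have htw : s.takeWhile (fun y => decide (y ≤ t)) = s :=
          List.takeWhile_eq_self_iff.mpr (fun x hx => by
            have := hall x hx; simp; omega)
        simp only [stepA_s, stepB_s, hL, if_neg (by omega : ¬ t < t), hb, htw,
          List.take_length]
        rw [if_neg (by simp : ¬ t ≠ t)]
        have he : (s.length : Int) - (s.length : Int) = 0 := by omega
        rw [he]

lemma stepB_s_sorted (s : List Int) (p : Int) (h : List.Pairwise (· < ·) s) :
    List.Pairwise (· < ·) (stepB_s s p).2 := by
  have hle : List.Pairwise (· ≤ ·) s := h.imp (fun hab => le_of_lt hab)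
  have hb := bisect_tw (s := s) p hle
  have ht2 : List.take (s.takeWhile (fun y => decide (y ≤ p))).length s
      = s.takeWhile (fun y => decide (y ≤ p)) :=
    (List.prefix_iff_eq_take.mp (List.takeWhile_prefix _)).symm
  have htws : List.Pairwise (· < ·) (s.takeWhile (fun y => decide (y ≤ p))) :=
    h.sublist (List.takeWhile_prefix _).sublist
  have hmem : ∀ x ∈ s.takeWhile (fun y => decide (y ≤ p)), x ≤ p := fun x hx => by
    have := List.mem_takeWhile_imp hx; simpa using this
  set tw := s.takeWhile (fun y => decide (y ≤ p)) with htwdef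
  simp only [stepB_s, hb, ht2]
  cases hL : tw.getLast? with
  | none =>
    have : tw = [] := List.getLast?_eq_none_iff.mp hL
    simp [this]
  | some t' =>
    have ht'p : t' ≤ p := hmem t' (List.mem_of_getLast? hL)
    dsimp only
    by_cases hne : t' = p
    · rw [if_neg (by simp [hne])]
      exact htws
    · have hlt : ∀ x ∈ tw, x < p := fun x hx =>
        lt_of_le_of_lt (sorted_last_le (htws.imp (fun hab => le_of_lt hab)) hL x hx)
          (lt_of_le_of_ne ht'p hne)
      rw [if_pos (show t' ≠ p from hne)]
      exact List.pairwise_append.mpr ⟨htws, by simp, fun a ha b hb => by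
        simp at hb; subst hb; exact hlt a ha⟩

lemma fold_eq : ∀ (m stk : List (List Int)) (cnt : Int),
    (∀ row ∈ m, row.length = 2 ∧ -5 ≤ row.getD 0 0 ∧ row.getD 0 0 ≤ 6) → InvStk stk →
    m.foldl stepA (stk, cnt) = m.foldl stepB (stk, cnt) := by
  intro m
  induction m with
  | nil => intro stk cnt _ _; rfl
  | cons row rest ih =>
    intro stk cnt hpre hinv
    obtain ⟨hlen, hl1, hl2⟩ := hpre row (by simp)
    obtain ⟨l, p, rfl⟩ := List.length_eq_two.mp hlen
    simp [List.getD] at hl1 hl2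
    have hj : ∃ j, lineIdx l = some j := by
      unfold lineIdx
      split_ifs with hA hB
      · exact ⟨_, rfl⟩
      · exact ⟨_, rfl⟩
      · omega
    obtain ⟨j, hj⟩ := hj
    have hsorted : List.Pairwise (· < ·) (stk.getD j []) := by
      by_cases hltl : j < stk.length
      · exact hinv _ (by rw [List.getD_eq_getElem _ _ hltl]; exact List.getElem_mem _)
      · rw [List.getD_eq_default _ _ (le_of_not_gt hltl)]; exact List.Pairwise.nil
    have hstep := step_s_eq (stk.getD j []) p hsorted
    simp only [List.getD] at hstep
    rw [List.foldl_cons, List.foldl_cons]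
    have hAB : stepA (stk, cnt) [l, p] = stepB (stk, cnt) [l, p] := by
      simp [stepA, stepB, hj, hstep]
    rw [hAB]
    have hBval : stepB (stk, cnt) [l, p] =
        (stk.set j (stepB_s (stk[j]?.getD []) p).2, cnt + (stepB_s (stk[j]?.getD []) p).1) := by
      simp [stepB, hj]
    rw [hBval]
    apply ih _ _ (fun r hr => hpre r (by simp [hr]))
    intro s hs
    rcases List.mem_or_eq_of_mem_set hs with hmemo | rfl
    · exact hinv s hmemo
    · exact stepB_s_sorted _ p hsorted

-- ===== VERDICT (by name: the statement is the Claim_ definition above) =====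
theorem solution_spec : Claim_equal_solution := by
  intro N P melody _ hpre
  unfold Spec_solution solution solution_alt
  rw [fold_eq melody _ 0 hpre (by intro s hs; simp at hs; simp [hs])]
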